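-- pv_equiv track=rewrite | github.com/Aimerfan/flowlab | core/infra/gitlab_func.py | timedelta_str
-- ===== SOURCE A (Python) =====
-- def timedelta_str(seconds):
--     """將相差秒數轉換為描述字串"""
--     # 時間單位與使用該單位的秒數上限
--     unit_dict = {
--         'second': 60,
--         'minute': 60 * 60,
--         'hour': 60 * 60 * 24,
--         'day': 60 * 60 * 24 * 7,
--         'week': 60 * 60 * 24 * 7 * 4,
--         'month': 60 * 60 * 24 * 30 * 12,
--         'year': None
--     }
--     prev_max = 1
--     for unit, max_sec in unit_dict.items():
--         if unit == 'year' or seconds < max_sec: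
--             redundant = int(seconds // prev_max)
--             plural = 's' if redundant > 1 else ''
--             return f'Updated {redundant} {unit}{plural} ago'
--         else:
--             prev_max = max_sec
-- ===== SOURCE B (Python) =====
-- # Binary search (bisect_right by hand) over the sorted threshold table,
-- # then one table lookup -- replaces A's linear scan with carried prev_max.
-- _UNITS = [('second', 1), ('minute', 60), ('hour', 3600), ('day', 86400),
--           ('week', 604800), ('month', 2419200), ('year', 31104000)]
-- _THRESHOLDS = [60, 3600, 86400, 604800, 2419200, 31104000]
--
--
-- def timedelta_str(seconds):
--     """將相差秒數轉換為描述字串"""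
--     lo, hi = 0, len(_THRESHOLDS)
--     while lo < hi:
--         mid = (lo + hi) // 2
--         if seconds < _THRESHOLDS[mid]:
--             hi = mid
--         else:
--             lo = mid + 1
--     unit, divisor = _UNITS[lo]
--     redundant = int(seconds // divisor)
--     plural = 's' if redundant > 1 else ''
--     return f'Updated {redundant} {unit}{plural} ago'
-- ===== Notes on version B (the rewrite author's own statement) =====
-- stated objective: alternative
-- what changed: Replaces A's linear ascending scan over a dict of unit thresholds with carried prev_max state by a hand-written binary search (bisect_right) over a sorted thresholds list that computes the unit index, followed by one table lookup of (unit, divisor).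
import Mathlib
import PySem

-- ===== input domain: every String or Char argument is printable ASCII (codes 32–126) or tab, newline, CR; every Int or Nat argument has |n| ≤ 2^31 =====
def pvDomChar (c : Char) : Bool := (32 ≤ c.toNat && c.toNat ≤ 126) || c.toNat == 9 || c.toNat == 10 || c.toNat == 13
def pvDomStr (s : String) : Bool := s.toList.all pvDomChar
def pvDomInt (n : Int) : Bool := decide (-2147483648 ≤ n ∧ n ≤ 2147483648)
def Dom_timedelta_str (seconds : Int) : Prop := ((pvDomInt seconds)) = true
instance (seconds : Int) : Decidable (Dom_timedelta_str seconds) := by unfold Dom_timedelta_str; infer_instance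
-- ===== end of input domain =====

-- B replaces A's linear threshold scan by a binary search over a sorted thresholds table (alternative algorithm, same cost).


-- ===== PORT A =====
-- Loop over the dict's (unit, max_sec) pairs carrying prev_max; `seconds < None` would raise
-- in Python but is shielded by the `or` short-circuit at 'year', so `none` maps to false here.
-- The [] case is unreachable ('year' always returns); Python would fall off returning None.
def pvA_loop (seconds : Int) : Int → List (String × Option Int) → String
  | _, [] => ""
  | prev_max, (unit, max_sec) :: rest =>
    if unit == "year" || (match max_sec with | some m => decide (seconds < m) | none => false) then
      let redundant := PySem.Int.floordiv seconds prev_max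
      let plural := if redundant > 1 then "s" else ""
      "Updated " ++ PySem.Int.toStr redundant ++ " " ++ unit ++ plural ++ " ago"
    else
      pvA_loop seconds (max_sec.getD 0) rest

def timedelta_str (seconds : Int) : String :=
  let unit_dict : List (String × Option Int) :=
    [("second", some 60), ("minute", some (60*60)), ("hour", some (60*60*24)),
     ("day", some (60*60*24*7)), ("week", some (60*60*24*7*4)),
     ("month", some (60*60*24*30*12)), ("year", none)]
  pvA_loop seconds 1 unit_dict

-- ===== PORT B =====
def pvB_units : List (String × Int) :=
  [("second", 1), ("minute", 60), ("hour", 3600), ("day", 86400),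
   ("week", 604800), ("month", 2419200), ("year", 31104000)]

def pvB_thresholds : List Int := [60, 3600, 86400, 604800, 2419200, 31104000]

-- the `while lo < hi` binary-search loop of Source B, step for step; the fuel argument only
-- totalizes the loop (any fuel ≥ hi - lo gives the loop's value; the caller passes hi - lo = 6).
-- Source B's `mid = (lo + hi) // 2` is written inline ((lo + hi) / 2 — Nat division = Python // here).
def pvB_bsearch (seconds : Int) : Nat → Nat → Nat → Nat
  | 0, lo, _ => lo
  | fuel + 1, lo, hi =>
    if lo < hi then
      if seconds < (pvB_thresholds.getD ((lo + hi) / 2) 0) then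
        pvB_bsearch seconds fuel lo ((lo + hi) / 2)
      else
        pvB_bsearch seconds fuel ((lo + hi) / 2 + 1) hi
    else lo

def timedelta_str_alt (seconds : Int) : String :=
  let lo := pvB_bsearch seconds (pvB_thresholds.length - 0) 0 pvB_thresholds.length
  let ud := pvB_units.getD lo ("", 0)
  let redundant := PySem.Int.floordiv seconds ud.2
  let plural := if redundant > 1 then "s" else ""
  "Updated " ++ PySem.Int.toStr redundant ++ " " ++ ud.1 ++ plural ++ " ago"

-- ===== PRECONDITION & SPEC =====
def Spec_timedelta_str (seconds : Int) (out : String) : Prop := out = timedelta_str_alt seconds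
instance (seconds : Int) (out : String) : Decidable (Spec_timedelta_str seconds out) := by unfold Spec_timedelta_str; infer_instance

-- ===== CLAIM (what is proved, stated in full; the proofs are below) =====
def Claim_equal_timedelta_str : Prop := ∀ (seconds : Int), Dom_timedelta_str seconds → Spec_timedelta_str seconds (timedelta_str seconds)

-- ===== LEMMAS AND PROOFS =====

-- one unfolding step of the binary search, with the literal indices evaluated
theorem pvB_step (seconds : Int) (fuel lo hi mid : Nat) (t : Int) (c : Bool)
    (hlt : lo < hi) (hmid : (lo + hi) / 2 = mid)
    (ht : pvB_thresholds.getD mid 0 = t)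
    (hc : decide (seconds < t) = c) :
    pvB_bsearch seconds (fuel + 1) lo hi =
      (if c then pvB_bsearch seconds fuel lo mid else pvB_bsearch seconds fuel (mid + 1) hi) := by
  rw [pvB_bsearch, if_pos hlt, hmid, ht]
  rcases c with _ | _ <;> simp_all

theorem pvB_base (seconds : Int) (fuel lo : Nat) : pvB_bsearch seconds fuel lo lo = lo := by
  cases fuel <;> simp [pvB_bsearch]

-- ===== VERDICT (by name: the statement is the Claim_ definition above) =====
theorem timedelta_str_spec : Claim_equal_timedelta_str := by
  intro seconds _
  unfold Spec_timedelta_str timedelta_str timedelta_str_alt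
  by_cases h1 : seconds < 60
  · have e : pvB_bsearch seconds (pvB_thresholds.length - 0) 0 pvB_thresholds.length = 0 := by
      rw [show pvB_thresholds.length - 0 = 6 from rfl, show pvB_thresholds.length = 6 from rfl,
          pvB_step seconds 5 0 6 3 604800 true (by decide) (by decide) (by decide) (by simp; omega), if_pos rfl,
          pvB_step seconds 4 0 3 1 3600 true (by decide) (by decide) (by decide) (by simp; omega), if_pos rfl,
          pvB_step seconds 3 0 1 0 60 true (by decide) (by decide) (by decide) (by simp [h1]), if_pos rfl, pvB_base]
    rw [e]; simp [pvA_loop, pvB_units, h1]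
  · by_cases h2 : seconds < 3600
    · have e : pvB_bsearch seconds (pvB_thresholds.length - 0) 0 pvB_thresholds.length = 1 := by
        rw [show pvB_thresholds.length - 0 = 6 from rfl, show pvB_thresholds.length = 6 from rfl,
            pvB_step seconds 5 0 6 3 604800 true (by decide) (by decide) (by decide) (by simp; omega), if_pos rfl,
            pvB_step seconds 4 0 3 1 3600 true (by decide) (by decide) (by decide) (by simp [h2]), if_pos rfl,
            pvB_step seconds 3 0 1 0 60 false (by decide) (by decide) (by decide) (by simp [h1]), if_neg (by simp), pvB_base]
      rw [e]; simp [pvA_loop, pvB_units, h1, h2]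
    · by_cases h3 : seconds < 86400
      · have e : pvB_bsearch seconds (pvB_thresholds.length - 0) 0 pvB_thresholds.length = 2 := by
          rw [show pvB_thresholds.length - 0 = 6 from rfl, show pvB_thresholds.length = 6 from rfl,
              pvB_step seconds 5 0 6 3 604800 true (by decide) (by decide) (by decide) (by simp; omega), if_pos rfl,
              pvB_step seconds 4 0 3 1 3600 false (by decide) (by decide) (by decide) (by simp [h2]), if_neg (by simp),
              pvB_step seconds 3 2 3 2 86400 true (by decide) (by decide) (by decide) (by simp [h3]), if_pos rfl, pvB_base]
        rw [e]; simp [pvA_loop, pvB_units, h1, h2, h3]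
      · by_cases h4 : seconds < 604800
        · have e : pvB_bsearch seconds (pvB_thresholds.length - 0) 0 pvB_thresholds.length = 3 := by
            rw [show pvB_thresholds.length - 0 = 6 from rfl, show pvB_thresholds.length = 6 from rfl,
                pvB_step seconds 5 0 6 3 604800 true (by decide) (by decide) (by decide) (by simp [h4]), if_pos rfl,
                pvB_step seconds 4 0 3 1 3600 false (by decide) (by decide) (by decide) (by simp [h2]), if_neg (by simp),
                pvB_step seconds 3 2 3 2 86400 false (by decide) (by decide) (by decide) (by simp [h3]), if_neg (by simp), pvB_base]
          rw [e]; simp [pvA_loop, pvB_units, h1, h2, h3, h4]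
        · by_cases h5 : seconds < 2419200
          · have e : pvB_bsearch seconds (pvB_thresholds.length - 0) 0 pvB_thresholds.length = 4 := by
              rw [show pvB_thresholds.length - 0 = 6 from rfl, show pvB_thresholds.length = 6 from rfl,
                  pvB_step seconds 5 0 6 3 604800 false (by decide) (by decide) (by decide) (by simp [h4]), if_neg (by simp),
                  pvB_step seconds 4 4 6 5 31104000 true (by decide) (by decide) (by decide) (by simp; omega), if_pos rfl,
                  pvB_step seconds 3 4 5 4 2419200 true (by decide) (by decide) (by decide) (by simp [h5]), if_pos rfl, pvB_base]
            rw [e]; simp [pvA_loop, pvB_units, h1, h2, h3, h4, h5]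
          · by_cases h6 : seconds < 31104000
            · have e : pvB_bsearch seconds (pvB_thresholds.length - 0) 0 pvB_thresholds.length = 5 := by
                rw [show pvB_thresholds.length - 0 = 6 from rfl, show pvB_thresholds.length = 6 from rfl,
                    pvB_step seconds 5 0 6 3 604800 false (by decide) (by decide) (by decide) (by simp [h4]), if_neg (by simp),
                    pvB_step seconds 4 4 6 5 31104000 true (by decide) (by decide) (by decide) (by simp [h6]), if_pos rfl,
                    pvB_step seconds 3 4 5 4 2419200 false (by decide) (by decide) (by decide) (by simp [h5]), if_neg (by simp), pvB_base]
              rw [e]; simp [pvA_loop, pvB_units, h1, h2, h3, h4, h5, h6]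
            · have e : pvB_bsearch seconds (pvB_thresholds.length - 0) 0 pvB_thresholds.length = 6 := by
                rw [show pvB_thresholds.length - 0 = 6 from rfl, show pvB_thresholds.length = 6 from rfl,
                    pvB_step seconds 5 0 6 3 604800 false (by decide) (by decide) (by decide) (by simp [h4]), if_neg (by simp),
                    pvB_step seconds 4 4 6 5 31104000 false (by decide) (by decide) (by decide) (by simp [h6]), if_neg (by simp), pvB_base]
              rw [e]; simp [pvA_loop, pvB_units, h1, h2, h3, h4, h5, h6]
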